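-- pv_equiv track=rewrite | github.com/tomasvalik/APRG_projekt3.3 | verze_zviratka.py | dividing_function
-- ===== SOURCE A (Python) =====
-- from math import floor, ceil
--
-- def sorting_function(neroztrideny_seznam_slov):
--     return sorted(neroztrideny_seznam_slov, key=str.lower)
--
-- def porovnani(slovo, seznam_slov):
--     if len(seznam_slov) < 1:
--         return []
--     elif len(seznam_slov) == 1:
--         if slovo == seznam_slov[0]:
--             return seznam_slov[0]
--     elif len(seznam_slov) > 1:
--         if slovo == seznam_slov[(floor((len(seznam_slov))/2))]:
--             return seznam_slov[(floor((len(seznam_slov))/2))]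
--         else:
--             por = sorting_function([slovo, seznam_slov[floor((len(seznam_slov))/2)]])
--             if slovo == por[0]:
--                 vys = porovnani(slovo, seznam_slov[:(floor(len(seznam_slov) / 2))])
--                 return vys
--             elif slovo == por[1]:
--                 vys = porovnani(slovo, seznam_slov[((floor(len(seznam_slov) / 2))+1):])
--                 return vys
--
-- def dividing_function(slovo, knihovna, kam):
--     vysledek_dividing_function = []
--     index = 1
--     while (index) < len(slovo):
--         a = list(slovo)[:index]
--         b = list(slovo)[index:]
--         c = ""
--         d = ""
--         for k in a:
--             c = c + k
--         for l in b:
--             d = d + l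
--         if (porovnani(c, knihovna) == c) and (porovnani(d, knihovna) == d):
--             kam.append(c + " " + d)
--         index = index + 1
--     return kam
-- ===== SOURCE B (Python) =====
-- def dividing_function(slovo, knihovna, kam):
--     # Iterative binary search (same probe sequence and case-insensitive
--     # direction rule as A's recursive porovnani, so identical results even
--     # on unsorted libraries).  Mutates kam like A (append).
--     def found(w):
--         lo, hi = 0, len(knihovna)
--         while hi - lo > 1:
--             mid = lo + (hi - lo) // 2
--             m = knihovna[mid]
--             if w == m:
--                 return True
--             if w.lower() <= m.lower():
--                 hi = mid
--             else:
--                 lo = mid + 1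
--         return hi - lo == 1 and w == knihovna[lo]
--
--     for i in range(1, len(slovo)):
--         c, d = slovo[:i], slovo[i:]
--         if found(c) and found(d):
--             kam.append(c + " " + d)
--     return kam
-- ===== Notes on version B (the rewrite author's own statement) =====
-- stated objective: alternative
-- what changed: Replaces A's recursive slice-copying binary-search helper porovnani (and its sorted()-based direction test and char-by-char string rebuilding) with an explicit iterative lo/hi binary search over indices using the same probe sequence and str.lower comparison, and direct string slicing.
import Mathlib
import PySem

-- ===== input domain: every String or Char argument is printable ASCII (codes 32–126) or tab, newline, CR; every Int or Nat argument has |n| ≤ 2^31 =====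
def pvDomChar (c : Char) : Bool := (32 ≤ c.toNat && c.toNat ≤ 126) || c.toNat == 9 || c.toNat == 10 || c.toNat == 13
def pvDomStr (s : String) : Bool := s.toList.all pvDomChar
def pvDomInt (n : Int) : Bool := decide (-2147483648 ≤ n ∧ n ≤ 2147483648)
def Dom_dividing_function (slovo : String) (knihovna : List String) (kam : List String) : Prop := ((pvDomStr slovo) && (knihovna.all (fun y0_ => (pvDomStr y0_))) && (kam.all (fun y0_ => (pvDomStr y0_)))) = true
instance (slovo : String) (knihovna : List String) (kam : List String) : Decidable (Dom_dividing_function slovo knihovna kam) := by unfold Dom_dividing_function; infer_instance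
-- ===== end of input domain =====

-- B replaces A's recursive slice-copying binary-search helper `porovnani` by an
-- explicit iterative lo/hi binary search with the same probe sequence and the same
-- str.lower direction rule (objective: alternative decomposition, recursion → loop).
-- Both A and B append the found splits to the argument list `kam` (the same
-- observable mutation); the theorem below is about the returned value.

-- ===== PORT A =====

-- Python's porovnani can return a string, the empty list [] or None; only
-- `result == <some str>` is ever asked of it, which is true exactly for an equal string.
inductive PRes where
  | str : String → PRes
  | emptyList : PRes
  | noneV : PRes
deriving DecidableEq

-- transliteration of Python's `porovnani(x, kn) == x` ([] and None never equal a str)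
def pResEq (r : PRes) (s : String) : Bool :=
  match r with
  | .str t => t == s
  | _ => false

def sorting_function (neroztrideny_seznam_slov : List String) : List String :=
  PySem.List.sorted neroztrideny_seznam_slov PySem.Str.lower

-- `floor(len(..)/2)` on a nonnegative int is exact Nat division; the `pyGetD _ _ ""`
-- indices are always in range in this code (the "" default is never read).
def porovnani (slovo : String) (seznam_slov : List String) : PRes :=
  if seznam_slov.length < 1 then .emptyList
  else if seznam_slov.length = 1 then
    if slovo = PySem.List.pyGetD seznam_slov 0 "" then
      .str (PySem.List.pyGetD seznam_slov 0 "")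
    else .noneV
  else
    if slovo = PySem.List.pyGetD seznam_slov ((seznam_slov.length / 2 : Nat) : Int) "" then
      .str (PySem.List.pyGetD seznam_slov ((seznam_slov.length / 2 : Nat) : Int) "")
    else
      let por := sorting_function [slovo, PySem.List.pyGetD seznam_slov ((seznam_slov.length / 2 : Nat) : Int) ""]
      if slovo = PySem.List.pyGetD por 0 "" then
        porovnani slovo (PySem.List.slice seznam_slov none (some ((seznam_slov.length / 2 : Nat) : Int)))
      else if slovo = PySem.List.pyGetD por 1 "" then
        porovnani slovo (PySem.List.slice seznam_slov (some ((seznam_slov.length / 2 + 1 : Nat) : Int)) none)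
      else .noneV
termination_by seznam_slov.length
decreasing_by
  · rw [PySem.List.slice_to seznam_slov (Int.natCast_nonneg _)]
    simp only [Int.toNat_natCast, List.length_take]
    omega
  · rw [PySem.List.slice_from seznam_slov (Int.natCast_nonneg _)]
    simp only [Int.toNat_natCast, List.length_drop]
    omega

-- the body of A's while loop (index advances by exactly 1 each pass, so the while
-- loop is the fold of this body over range(1, len(slovo)))
def dividing_body (slovo : String) (knihovna : List String) (kam : List String) (index : Int) : List String :=
  let a := PySem.List.slice slovo.toList none (some index)
  let b := PySem.List.slice slovo.toList (some index) none
  let c := a.foldl (fun c k => c ++ [k]) []      -- c = c + k, on code points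
  let d := b.foldl (fun d l => d ++ [l]) []
  if pResEq (porovnani (String.ofList c) knihovna) (String.ofList c)
      && pResEq (porovnani (String.ofList d) knihovna) (String.ofList d) then
    kam ++ [String.ofList (c ++ ' ' :: d)]       -- kam.append(c + " " + d)
  else kam

def dividing_function (slovo : String) (knihovna : List String) (kam : List String) : List String :=
  (PySem.List.pyRange 1 (PySem.Str.len slovo)).foldl (dividing_body slovo knihovna) kam

-- ===== PORT B =====

-- B's iterative binary search: `while hi - lo > 1: …`
def bsLoop (w : String) (knihovna : List String) (lo hi : Nat) : Bool :=
  if hi - lo > 1 then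
    let mid := lo + (hi - lo) / 2
    let m := PySem.List.pyGetD knihovna (mid : Int) ""
    if w = m then true
    else if PySem.Str.lower w ≤ PySem.Str.lower m then bsLoop w knihovna lo mid
    else bsLoop w knihovna (mid + 1) hi
  else decide (hi - lo = 1) && (w == PySem.List.pyGetD knihovna ((lo : Nat) : Int) "")
termination_by hi - lo
decreasing_by
  all_goals omega

def bsFound (w : String) (knihovna : List String) : Bool :=
  bsLoop w knihovna 0 knihovna.length

-- B's `for i in range(1, len(slovo))` loop, as recursion on i
def divLoop (slovo : List Char) (knihovna : List String) (i : Nat) (kam : List String) : List String :=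
  if i < slovo.length then
    let c := slovo.take i
    let d := slovo.drop i
    divLoop slovo knihovna (i + 1)
      (if bsFound (String.ofList c) knihovna && bsFound (String.ofList d) knihovna then
        kam ++ [String.ofList (c ++ ' ' :: d)]
      else kam)
  else kam
termination_by slovo.length - i

def dividing_function_alt (slovo : String) (knihovna : List String) (kam : List String) : List String :=
  divLoop slovo.toList knihovna 1 kam

-- ===== PRECONDITION & SPEC =====
def Spec_dividing_function (slovo : String) (knihovna : List String) (kam : List String) (out : List String) : Prop := out = dividing_function_alt slovo knihovna kam
instance (slovo : String) (knihovna : List String) (kam : List String) (out : List String) : Decidable (Spec_dividing_function slovo knihovna kam out) := by unfold Spec_dividing_function; infer_instance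

-- ===== CLAIM (what is proved, stated in full; the proofs are below) =====
def Claim_equal_dividing_function : Prop := ∀ (slovo : String) (knihovna : List String) (kam : List String), Dom_dividing_function slovo knihovna kam → Spec_dividing_function slovo knihovna kam (dividing_function slovo knihovna kam)

-- ===== LEMMAS AND PROOFS =====

-- sorted(key=str.lower) on a two-element list: stable, swaps only on strict key order
lemma sorted_pair (a b : String) :
    sorting_function [a, b] =
      if PySem.Str.lower b < PySem.Str.lower a then [b, a] else [a, b] := by
  unfold sorting_function
  rw [PySem.List.sorted_eq_foldl_insertBy]
  simp only [List.foldl_cons, List.foldl_nil, PySem.List.insertBy]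
  split_ifs with h <;> simp_all

-- one step of porovnani on a list of length ≥ 2, with the case split expressed by
-- the str.lower comparison B uses
lemma porovnani_step (w : String) (sub : List String) (h2 : 2 ≤ sub.length) :
    porovnani w sub =
      (if w = sub.getD (sub.length / 2) "" then PRes.str (sub.getD (sub.length / 2) "")
      else if PySem.Str.lower w ≤ PySem.Str.lower (sub.getD (sub.length / 2) "") then
        porovnani w (sub.take (sub.length / 2))
      else porovnani w (sub.drop (sub.length / 2 + 1))) := by
  rw [porovnani.eq_def, if_neg (by omega : ¬ sub.length < 1), if_neg (by omega : ¬ sub.length = 1)]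
  rw [PySem.List.pyGetD_natCast sub (sub.length / 2) ""]
  dsimp only
  by_cases he : w = sub.getD (sub.length / 2) ""
  · rw [if_pos he, if_pos he]
  · rw [if_neg he, if_neg he]
    have g0 : ∀ x y : String, PySem.List.pyGetD [x, y] 0 "" = x := by
      intro x y; simp [PySem.List.pyGetD_ofNat']
    have g1 : ∀ x y : String, PySem.List.pyGetD [x, y] 1 "" = y := by
      intro x y; simp [PySem.List.pyGetD_ofNat']
    have hsl : PySem.List.slice sub none (some ((sub.length / 2 : Nat) : Int)) = sub.take (sub.length / 2) := by
      rw [PySem.List.slice_to sub (Int.natCast_nonneg _), Int.toNat_natCast]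
    have hsr : PySem.List.slice sub (some ((sub.length / 2 + 1 : Nat) : Int)) none = sub.drop (sub.length / 2 + 1) := by
      rw [PySem.List.slice_from sub (Int.natCast_nonneg _), Int.toNat_natCast]
    rw [sorted_pair]
    by_cases hlt : PySem.Str.lower (sub.getD (sub.length / 2) "") < PySem.Str.lower w
    · rw [if_pos hlt, g0, g1, if_neg he, if_pos rfl, hsr, if_neg (not_le.mpr hlt)]
    · rw [if_neg hlt, g0, if_pos rfl, hsl, if_pos (not_lt.mp hlt)]

-- base case of the search: windows of width 0 or 1
lemma bs_small (w : String) (kn : List String) (lo hi : Nat) (h1 : hi - lo ≤ 1)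
    (h2 : lo ≤ hi) (h3 : hi ≤ kn.length) :
    bsLoop w kn lo hi = pResEq (porovnani w ((kn.drop lo).take (hi - lo))) w := by
  rw [bsLoop.eq_def, if_neg (by omega : ¬ hi - lo > 1)]
  by_cases h0 : hi - lo = 0
  · rw [h0]
    simp only [List.take_zero]
    rw [porovnani.eq_def]
    simp [pResEq]
  · have hk1 : hi - lo = 1 := by omega
    have hlo : lo < kn.length := by omega
    have hsub : List.take 1 (List.drop lo kn) = [kn[lo]] := by
      rw [List.drop_eq_getElem_cons hlo]
      rfl
    rw [hk1, hsub, porovnani.eq_def]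
    have hget0 : PySem.List.pyGetD [kn[lo]] 0 "" = kn[lo] := by
      simp [PySem.List.pyGetD_ofNat']
    simp only [List.length_cons, List.length_nil, hget0]
    rw [if_neg (by norm_num), if_pos (by norm_num)]
    have hgetlo : PySem.List.pyGetD kn ((lo : Nat) : Int) "" = kn[lo] := by
      rw [PySem.List.pyGetD_natCast, List.getD_eq_getElem kn "" hlo]
    rw [hgetlo]
    by_cases he : w = kn[lo]
    · simp [he, pResEq]
    · simp [he, pResEq]

-- the iterative search equals `porovnani(w, kn[lo:hi]) == w`
lemma bs_eq (w : String) (kn : List String) :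
    ∀ (n lo hi : Nat), hi - lo ≤ n → lo ≤ hi → hi ≤ kn.length →
      bsLoop w kn lo hi = pResEq (porovnani w ((kn.drop lo).take (hi - lo))) w := by
  intro n
  induction n with
  | zero =>
    intro lo hi h1 h2 h3
    exact bs_small w kn lo hi (by omega) h2 h3
  | succ n ih =>
    intro lo hi h1 h2 h3
    by_cases hsmall : hi - lo ≤ 1
    · exact bs_small w kn lo hi hsmall h2 h3
    · have hk2 : 2 ≤ hi - lo := by omega
      have hsublen : ((kn.drop lo).take (hi - lo)).length = hi - lo := by
        simp only [List.length_take, List.length_drop]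
        omega
      have hmidlt : lo + (hi - lo) / 2 < kn.length := by omega
      have hget : ((kn.drop lo).take (hi - lo)).getD ((hi - lo) / 2) "" = kn[lo + (hi - lo) / 2] := by
        have hl : (hi - lo) / 2 < ((kn.drop lo).take (hi - lo)).length := by
          rw [hsublen]; omega
        rw [List.getD_eq_getElem _ "" hl, List.getElem_take, List.getElem_drop]
      have hgetB : PySem.List.pyGetD kn ((lo + (hi - lo) / 2 : Nat) : Int) "" = kn[lo + (hi - lo) / 2] := by
        rw [PySem.List.pyGetD_natCast, List.getD_eq_getElem kn "" hmidlt]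
      rw [porovnani_step w _ (by rw [hsublen]; omega), hsublen, hget]
      rw [bsLoop.eq_def, if_pos (by omega : hi - lo > 1)]
      dsimp only
      rw [hgetB]
      by_cases he : w = kn[lo + (hi - lo) / 2]
      · rw [if_pos he, if_pos he]
        simp [pResEq, he]
      · rw [if_neg he, if_neg he]
        by_cases hle : PySem.Str.lower w ≤ PySem.Str.lower kn[lo + (hi - lo) / 2]
        · rw [if_pos hle, if_pos hle]
          have ht : ((kn.drop lo).take (hi - lo)).take ((hi - lo) / 2)
              = (kn.drop lo).take (lo + (hi - lo) / 2 - lo) := by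
            rw [List.take_take]
            congr 1
            omega
          rw [ht]
          exact ih lo (lo + (hi - lo) / 2) (by omega) (by omega) (by omega)
        · rw [if_neg hle, if_neg hle]
          have hd : ((kn.drop lo).take (hi - lo)).drop ((hi - lo) / 2 + 1)
              = (kn.drop (lo + (hi - lo) / 2 + 1)).take (hi - (lo + (hi - lo) / 2 + 1)) := by
            rw [List.drop_take, List.drop_drop]
            have e1 : lo + ((hi - lo) / 2 + 1) = lo + (hi - lo) / 2 + 1 := by omega
            have e2 : hi - lo - ((hi - lo) / 2 + 1) = hi - (lo + (hi - lo) / 2 + 1) := by omega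
            rw [e1, e2]
          rw [hd]
          exact ih (lo + (hi - lo) / 2 + 1) hi (by omega) (by omega) h3

lemma bsFound_eq (w : String) (kn : List String) :
    bsFound w kn = pResEq (porovnani w kn) w := by
  have h := bs_eq w kn kn.length 0 kn.length (by omega) (by omega) (le_refl _)
  simpa [bsFound] using h

-- an empty Python range
lemma pyRange_nil (a b : Int) (h : ¬ a < b) : PySem.List.pyRange a b = [] := by
  simp [PySem.List.pyRange, h]

-- one pass of A's loop body equals one pass of B's
lemma body_eq (sl : String) (kn : List String) (kam : List String) (i : Nat) :
    dividing_body sl kn kam (i : Int) =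
      (if bsFound (String.ofList (sl.toList.take i)) kn && bsFound (String.ofList (sl.toList.drop i)) kn then
        kam ++ [String.ofList (sl.toList.take i ++ ' ' :: sl.toList.drop i)]
      else kam) := by
  simp only [dividing_body]
  rw [PySem.List.slice_to sl.toList (Int.natCast_nonneg _),
    PySem.List.slice_from sl.toList (Int.natCast_nonneg _)]
  simp only [Int.toNat_natCast, PySem.List.foldl_append_singleton, List.nil_append, bsFound_eq]

lemma div_eq (sl : String) (kn : List String) :
    ∀ (n i : Nat) (kam : List String), sl.toList.length - i ≤ n →
      (PySem.List.pyRange (i : Int) (PySem.Str.len sl)).foldl (dividing_body sl kn) kam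
        = divLoop sl.toList kn i kam := by
  intro n
  induction n with
  | zero =>
    intro i kam h
    have hge : sl.toList.length ≤ i := by omega
    have hnlt : ¬ ((i : Int) < PySem.Str.len sl) := by
      show ¬ ((i : Int) < ((sl.toList.length : Nat) : Int))
      exact_mod_cast not_lt.mpr hge
    rw [divLoop.eq_def, if_neg (not_lt.mpr hge)]
    rw [pyRange_nil _ _ hnlt, List.foldl_nil]
  | succ n ih =>
    intro i kam h
    by_cases hlt : i < sl.toList.length
    · have hcast : (i : Int) < PySem.Str.len sl := by
        simp only [PySem.Str.len]
        exact_mod_cast hlt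
      rw [PySem.List.pyRange_one_cons hcast, List.foldl_cons, body_eq]
      rw [show ((i : Int) + 1) = (((i + 1 : Nat)) : Int) by push_cast; ring]
      rw [ih (i + 1) _ (by omega)]
      conv_rhs => rw [divLoop.eq_def]
      rw [if_pos hlt]
    · have hge : sl.toList.length ≤ i := by omega
      have hnlt : ¬ ((i : Int) < PySem.Str.len sl) := by
        show ¬ ((i : Int) < ((sl.toList.length : Nat) : Int))
        exact_mod_cast not_lt.mpr hge
      rw [divLoop.eq_def, if_neg (not_lt.mpr hge)]
      rw [pyRange_nil _ _ hnlt, List.foldl_nil]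

-- ===== VERDICT (by name: the statement is the Claim_ definition above) =====
theorem dividing_function_spec : Claim_equal_dividing_function := by
  intro slovo knihovna kam _
  unfold Spec_dividing_function dividing_function dividing_function_alt
  simpa using div_eq slovo knihovna slovo.toList.length 1 kam (by omega)
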